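-- pv_equiv track=rewrite | github.com/janparaniak/add_dns | add_dns_multiple_accounts_feb_2025.py | reorder_mappings
-- ===== SOURCE A (Python) =====
-- def reorder_mappings(mappings):
--     """
--     Reorder account mappings so that:
--       - 646253092271 (Central Admin) is first,
--       - 727712672144 (Contently Prod) is second,
--       - then everything else.
--     """
--     preferred = []
--     others = []
--     for mapping in mappings:
--         acct = mapping.get("account_id")
--         if acct == "646253092271" or acct == "727712672144":
--             preferred.append(mapping)
--         else:
--             others.append(mapping)
--     # Sort so that 646253092271 is first, 727712672144 is second
--     preferred.sort(key=lambda m: 0 if m.get("account_id") == "646253092271" else 1)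
--     return preferred + others
-- ===== SOURCE B (Python) =====
-- def reorder_mappings(mappings):
--     """
--     Reorder account mappings so that:
--       - 646253092271 (Central Admin) is first,
--       - 727712672144 (Contently Prod) is second,
--       - then everything else.
--     """
--     central = [m for m in mappings if m.get("account_id") == "646253092271"]
--     contently = [m for m in mappings if m.get("account_id") == "727712672144"]
--     rest = [m for m in mappings
--             if m.get("account_id") not in ("646253092271", "727712672144")]
--     return central + contently + rest
-- ===== Notes on version B (the rewrite author's own statement) =====
-- stated objective: simpler
-- what changed: Replaces the two-bucket accumulation plus stable sort with three independent filter passes (central, contently, rest) concatenated; no sort and no mutable accumulators.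
import Mathlib
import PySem

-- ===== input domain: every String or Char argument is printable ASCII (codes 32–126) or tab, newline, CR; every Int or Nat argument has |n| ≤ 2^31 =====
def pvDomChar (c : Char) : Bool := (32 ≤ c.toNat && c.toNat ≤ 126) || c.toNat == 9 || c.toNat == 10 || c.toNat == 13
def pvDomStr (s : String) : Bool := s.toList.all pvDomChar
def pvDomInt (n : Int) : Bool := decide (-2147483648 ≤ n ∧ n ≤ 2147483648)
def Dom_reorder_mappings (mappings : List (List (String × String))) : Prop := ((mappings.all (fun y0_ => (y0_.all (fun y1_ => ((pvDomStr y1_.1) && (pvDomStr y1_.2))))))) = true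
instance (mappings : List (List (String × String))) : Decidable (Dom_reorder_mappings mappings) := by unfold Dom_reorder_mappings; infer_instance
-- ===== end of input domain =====

-- B replaces A's two-bucket accumulation plus stable sort with three independent
-- filter passes concatenated (no sort); simpler, same return value.


-- ===== PORT A =====
-- mapping.get("account_id"): first-match lookup in the association list (dict convention)
def acctOf : List (String × String) → Option String
  | [] => none
  | (k, v) :: rest => if k = "account_id" then some v else acctOf rest

-- A's sort key: 0 if m.get("account_id") == "646253092271" else 1
def keyA (m : List (String × String)) : Int :=
  if acctOf m = some "646253092271" then 0 else 1

def stepA (s : List (List (String × String)) × List (List (String × String)))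
    (mapping : List (String × String)) :
    List (List (String × String)) × List (List (String × String)) :=
  let acct := acctOf mapping
  if acct = some "646253092271" ∨ acct = some "727712672144" then
    (s.1 ++ [mapping], s.2)
  else
    (s.1, s.2 ++ [mapping])

def reorder_mappings (mappings : List (List (String × String))) : List (List (String × String)) :=
  let po := mappings.foldl stepA ([], [])
  PySem.List.sorted po.1 keyA ++ po.2

-- ===== PORT B =====
-- three independent comprehension passes over the same input, then concatenation
def reorder_mappings_alt (mappings : List (List (String × String))) : List (List (String × String)) :=
  let central := mappings.filter (fun m => decide (acctOf m = some "646253092271"))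
  let contently := mappings.filter (fun m => decide (acctOf m = some "727712672144"))
  let rest := mappings.filter
    (fun m => !(decide (acctOf m = some "646253092271") || decide (acctOf m = some "727712672144")))
  central ++ contently ++ rest

-- ===== PRECONDITION & SPEC =====
def Spec_reorder_mappings (mappings : List (List (String × String))) (out : List (List (String × String))) : Prop := out = reorder_mappings_alt mappings
instance (mappings : List (List (String × String))) (out : List (List (String × String))) : Decidable (Spec_reorder_mappings mappings out) := by unfold Spec_reorder_mappings; infer_instance

-- ===== CLAIM (what is proved, stated in full; the proofs are below) =====
def Claim_equal_reorder_mappings : Prop := ∀ (mappings : List (List (String × String))), Dom_reorder_mappings mappings → Spec_reorder_mappings mappings (reorder_mappings mappings)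

-- ===== LEMMAS AND PROOFS =====

def isC (m : List (String × String)) : Bool := acctOf m = some "646253092271"
def isK (m : List (String × String)) : Bool := acctOf m = some "727712672144"
def isPref (m : List (String × String)) : Bool := isC m || isK m

lemma keyA_cases (m : List (String × String)) : keyA m = 0 ∨ keyA m = 1 := by
  unfold keyA; split <;> simp

lemma keyA_le_one (m : List (String × String)) : keyA m ≤ 1 := by
  rcases keyA_cases m with h | h <;> omega

lemma foldA (ms : List (List (String × String))) :
    ∀ p o, ms.foldl stepA (p, o) =
      (p ++ ms.filter isPref, o ++ ms.filter (fun m => !isPref m)) := by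
  induction ms with
  | nil => intro p o; simp
  | cons x xs ih =>
    intro p o
    by_cases h : acctOf x = some "646253092271" ∨ acctOf x = some "727712672144"
    · have hp : isPref x = true := by
        unfold isPref isC isK; rcases h with h | h <;> simp [h]
      simp [List.foldl_cons, stepA, h, ih, hp]
    · have hp : isPref x = false := by
        unfold isPref isC isK
        push Not at h
        simp [h.1, h.2]
      simp [List.foldl_cons, stepA, h, ih, hp]

-- inserting a key-0 element into (all-key-0 ++ all-key-1)
lemma ins0 (x : List (String × String)) (c d : List (List (String × String)))
    (hx : keyA x = 0) (hc : ∀ y ∈ c, keyA y = 0) (hd : ∀ y ∈ d, keyA y = 1) :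
    PySem.List.insertBy (fun a b => decide (keyA a < keyA b)) x (c ++ d) = c ++ x :: d := by
  induction c with
  | nil =>
    cases d with
    | nil => simp [PySem.List.insertBy]
    | cons y ys =>
      have hy : keyA y = 1 := hd y (by simp)
      simp [PySem.List.insertBy, hx, hy]
  | cons y c ih =>
    have hy : keyA y = 0 := hc y (by simp)
    have hb : (decide (keyA x < keyA y)) = false := by simp [hx, hy]
    have h2 := ih (fun z hz => hc z (by simp [hz]))
    simp [PySem.List.insertBy, hb, h2]

-- inserting a key-1 element: it goes to the end
lemma ins1 (x : List (String × String)) (acc : List (List (String × String)))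
    (hx : keyA x = 1) :
    PySem.List.insertBy (fun a b => decide (keyA a < keyA b)) x acc = acc ++ [x] := by
  apply PySem.List.insertBy_of_forall_not_before
  intro y _
  have := keyA_le_one y
  simp; omega

lemma sortFold (p : List (List (String × String))) :
    ∀ c d, (∀ y ∈ c, keyA y = 0) → (∀ y ∈ d, keyA y = 1) →
    List.foldl (fun acc x => PySem.List.insertBy (fun a b => decide (keyA a < keyA b)) x acc) (c ++ d) p
      = (c ++ p.filter (fun m => decide (keyA m = 0))) ++ (d ++ p.filter (fun m => !decide (keyA m = 0))) := by
  induction p with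
  | nil => intro c d _ _; simp
  | cons x xs ih =>
    intro c d hc hd
    rcases keyA_cases x with hx | hx
    · rw [List.foldl_cons, ins0 x c d hx hc hd]
      have : c ++ x :: d = (c ++ [x]) ++ d := by simp
      rw [this, ih (c ++ [x]) d
        (by intro y hy; rcases List.mem_append.mp hy with h | h
            · exact hc y h
            · simp at h; subst h; exact hx) hd]
      simp [hx]
    · rw [List.foldl_cons, ins1 x (c ++ d) hx, List.append_assoc]
      rw [ih c (d ++ [x]) hc
        (by intro y hy; rcases List.mem_append.mp hy with h | h
            · exact hd y h
            · simp at h; subst h; exact hx)]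
      have hx0 : ¬ keyA x = 0 := by omega
      simp [hx0]

lemma sorted_keyA (p : List (List (String × String))) :
    PySem.List.sorted p keyA
      = p.filter (fun m => decide (keyA m = 0)) ++ p.filter (fun m => !decide (keyA m = 0)) := by
  rw [PySem.List.sorted_eq_foldl_insertBy]
  have := sortFold p [] [] (by simp) (by simp)
  simpa using this

lemma pref_and_key0 (m : List (String × String)) :
    (decide (keyA m = 0) && isPref m) = isC m := by
  unfold isPref isC isK keyA
  by_cases h1 : acctOf m = some "646253092271"
  · simp [h1]
  · simp [h1]

lemma pref_and_key1 (m : List (String × String)) :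
    (!decide (keyA m = 0) && isPref m) = isK m := by
  unfold isPref isC isK keyA
  by_cases h1 : acctOf m = some "646253092271"
  · simp [h1]
  · simp [h1]

-- ===== VERDICT (by name: the statement is the Claim_ definition above) =====
theorem reorder_mappings_spec : Claim_equal_reorder_mappings := by
  intro ms _
  unfold Spec_reorder_mappings reorder_mappings reorder_mappings_alt
  rw [foldA]
  dsimp only
  rw [sorted_keyA]
  simp only [List.nil_append, List.filter_filter]
  rw [List.filter_congr (fun m _ => pref_and_key0 m),
      List.filter_congr (fun m _ => pref_and_key1 m), List.append_assoc]
  simp only [isPref]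
  unfold isC isK
  rw [List.append_assoc]
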